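-- pv_equiv track=rewrite | github.com/olehkupriienko/Self-study | Codewars/044_Printer Errors.py | printer_error
-- ===== SOURCE A (Python) =====
-- def printer_error(s):
--     goodletters = 'abcdefghijklm'
--     errors = 0
--     totalletters = len(s)
--
--     for letter in s:
--         if letter not in goodletters:
--             errors += 1
--
--     return str(errors) + "/" + str(totalletters)
-- ===== SOURCE B (Python) =====
-- def printer_error(s):
--     total = len(s)
--     good = 0
--     for ch in 'abcdefghijklm':
--         good += s.count(ch)
--     return str(total - good) + "/" + str(total)
-- ===== Notes on version B (the rewrite author's own statement) =====
-- stated objective: faster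
-- what changed: Inverts the iteration: instead of one Python-level pass classifying each character, B loops over the 13 good letters, sums s.count(ch) for each (C-level scans), and reports errors as len(s) minus that good total.
import Mathlib
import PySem

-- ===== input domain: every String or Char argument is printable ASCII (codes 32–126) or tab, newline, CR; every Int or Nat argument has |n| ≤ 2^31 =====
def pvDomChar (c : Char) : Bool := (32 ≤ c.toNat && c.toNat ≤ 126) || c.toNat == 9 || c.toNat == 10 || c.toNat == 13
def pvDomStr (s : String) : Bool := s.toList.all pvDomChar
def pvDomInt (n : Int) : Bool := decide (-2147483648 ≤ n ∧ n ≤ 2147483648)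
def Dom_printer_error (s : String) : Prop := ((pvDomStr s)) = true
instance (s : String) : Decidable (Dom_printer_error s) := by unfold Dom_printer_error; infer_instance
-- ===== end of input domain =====

-- B inverts the iteration: it loops over the 13 good letters summing s.count(ch),
-- and reports errors as len(s) minus that good total (objective: faster, constant-factor, measured).


-- ===== PORT A =====
-- literal port: accumulator loop over the string, membership test in 'abcdefghijklm'
def printer_error (s : String) : String :=
  let goodletters : List Char := "abcdefghijklm".toList
  let totalletters : Int := PySem.Str.len s
  let errors : Int :=
    s.toList.foldl (fun acc letter => if letter ∈ goodletters then acc else acc + 1) 0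
  PySem.Int.toStr errors ++ "/" ++ PySem.Int.toStr totalletters

-- ===== PORT B =====
-- literal port of Source B: loop over the good letters, good += s.count(ch);
-- errors reported as total - good
def printer_error_alt (s : String) : String :=
  let total : Int := PySem.Str.len s
  let good : Int :=
    "abcdefghijklm".toList.foldl
      (fun acc ch => acc + (PySem.Str.count s (String.ofList [ch]) : Int)) 0
  PySem.Int.toStr (total - good) ++ "/" ++ PySem.Int.toStr total

-- ===== PRECONDITION & SPEC =====
def Spec_printer_error (s : String) (out : String) : Prop := out = printer_error_alt s
instance (s : String) (out : String) : Decidable (Spec_printer_error s out) := by unfold Spec_printer_error; infer_instance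

-- ===== CLAIM (what is proved, stated in full; the proofs are below) =====
def Claim_equal_printer_error : Prop := ∀ (s : String), Dom_printer_error s → Spec_printer_error s (printer_error s)

-- ===== LEMMAS AND PROOFS =====

-- PySem.Chars.count with a single-character needle is List.count
theorem chars_count_go_singleton (c : Char) : ∀ (fuel : Nat) (l : List Char) (acc : Nat), l.length ≤ fuel →
    PySem.Chars.count.go [c] fuel l acc = acc + l.count c := by
  intro fuel
  induction fuel with
  | zero => intro l acc h; cases l with
    | nil => simp [PySem.Chars.count.go]
    | cons x t => simp at h
  | succ n ih =>
    intro l acc h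
    cases l with
    | nil => simp [PySem.Chars.count.go]
    | cons x t =>
      simp only [PySem.Chars.count.go]
      by_cases hx : x = c
      · subst hx
        simp [List.isPrefixOf, ih t (acc + 1) (by simpa using h)]
        omega
      · simp [List.isPrefixOf, hx, ih t acc (by simpa using h), Ne.symm hx]

theorem chars_count_singleton (cs : List Char) (c : Char) :
    PySem.Chars.count cs [c] = cs.count c := by
  simp [PySem.Chars.count, chars_count_go_singleton c cs.length cs 0 le_rfl]

-- a 0/1 indicator sum over G is G.count
theorem sum_indicator_eq_count (x : Char) (G : List Char) :
    (G.map (fun ch => if x == ch then (1 : Nat) else 0)).sum = G.count x := by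
  induction G with
  | nil => simp
  | cons g gs ih =>
    simp only [List.map_cons, List.sum_cons, List.count_cons, ih]
    by_cases h : x = g
    · subst h; simp; omega
    · simp [h, Ne.symm h]

-- summing l.count over a duplicate-free list G counts the members of G inside l
theorem sum_counts (G : List Char) (hG : G.Nodup) (l : List Char) :
    (G.map (fun ch => l.count ch)).sum = l.countP (fun x => decide (x ∈ G)) := by
  induction l with
  | nil => simp
  | cons x xs ih =>
    have hc : (G.map fun ch => (x :: xs).count ch)
        = G.map (fun ch => xs.count ch + if x == ch then 1 else 0) := by
      refine List.map_congr_left (fun ch _ => ?_)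
      rw [List.count_cons]
    rw [hc, List.sum_map_add, ih, sum_indicator_eq_count, List.countP_cons]
    by_cases hx : x ∈ G
    · simp [hx, List.count_eq_one_of_mem hG hx]
    · simp [hx, List.count_eq_zero_of_not_mem hx]

-- A's counting loop: errors = length - (number of good characters)
theorem foldl_errors_eq (G : List Char) (l : List Char) (acc : Int) :
    l.foldl (fun a c => if c ∈ G then a else a + 1) acc
      = acc + (l.length : Int) - (l.countP (fun x => decide (x ∈ G)) : Int) := by
  induction l generalizing acc with
  | nil => simp
  | cons x xs ih =>
    by_cases h : x ∈ G <;>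
      simp [List.foldl, h, ih] <;> push_cast <;> ring

-- B's loop over the good letters is the sum of the counts
theorem foldl_good_eq (s : String) (G : List Char) (acc : Int) :
    G.foldl (fun acc ch => acc + (PySem.Str.count s (String.ofList [ch]) : Int)) acc
      = acc + ((G.map (fun ch => s.toList.count ch)).sum : Int) := by
  induction G generalizing acc with
  | nil => simp
  | cons g gs ih =>
    have h1 : PySem.Str.count s (String.ofList [g]) = s.toList.count g := by
      rw [PySem.Str.count_eq, String.toList_ofList, chars_count_singleton]
    rw [List.map_cons, List.sum_cons, List.foldl_cons, ih, h1]
    push_cast; ring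

-- ===== VERDICT (by name: the statement is the Claim_ definition above) =====
theorem printer_error_spec : Claim_equal_printer_error := by
  intro s _
  unfold Spec_printer_error printer_error printer_error_alt
  have hnodup : ("abcdefghijklm".toList).Nodup := by decide
  have hA := foldl_errors_eq "abcdefghijklm".toList s.toList 0
  have hB := foldl_good_eq s "abcdefghijklm".toList 0
  have hsum := sum_counts "abcdefghijklm".toList hnodup s.toList
  simp only [hA, hB, hsum, zero_add]
  have hlen : PySem.Str.len s = (s.toList.length : Int) := by
    simp [PySem.Str.len_eq]
  rw [hlen]
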